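-- pv_equiv track=rewrite | github.com/ahuigo/stock | db/profitLib.py | iterWindow
-- ===== SOURCE A (Python) =====
-- from itertools import islice
--
-- def iterWindow(seq, n=2):
--     it = iter(seq)
--     result = tuple(islice(it, n))
--     if len(result) == n:
--         yield result
--     for elem in it:
--         result = result[1:] + (elem,)
--         yield result
-- ===== SOURCE B (Python) =====
-- def iterWindow(seq, n=2):
--     items = list(seq)
--     for i in range(len(items) - n + 1):
--         yield tuple(items[i:i+n])
-- ===== Notes on version B (the rewrite author's own statement) =====
-- stated objective: alternative
-- what changed: Replaces A's streaming generator that primes a window with islice and slides it with tuple surgery by a staged implementation: materialize the sequence, then independently yield the slice items[i:i+n] for each starting index i in range(len-n+1); no window state is maintained.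
-- outside the precondition, e.g. on iterWindow([1, 2], 0): A returns [(), (1,), (2,)], B returns [(), (), ()]
import Mathlib
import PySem

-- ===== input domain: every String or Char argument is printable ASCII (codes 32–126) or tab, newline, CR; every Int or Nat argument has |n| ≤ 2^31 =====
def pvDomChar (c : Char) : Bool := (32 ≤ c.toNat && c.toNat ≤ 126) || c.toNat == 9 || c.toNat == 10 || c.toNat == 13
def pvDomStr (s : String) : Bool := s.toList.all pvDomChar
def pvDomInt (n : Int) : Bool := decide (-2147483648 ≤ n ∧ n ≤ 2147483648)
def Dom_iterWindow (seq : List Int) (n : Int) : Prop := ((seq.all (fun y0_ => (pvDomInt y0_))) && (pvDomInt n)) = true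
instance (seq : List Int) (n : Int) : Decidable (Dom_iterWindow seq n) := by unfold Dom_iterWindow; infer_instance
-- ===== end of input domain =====

-- B replaces A's stateful sliding window (islice priming + tuple surgery) by a staged
-- index-based computation: materialize, then emit the independent slice [i, i+n) for
-- each valid start index; objective: alternative decomposition, same cost.

-- ===== PORT A =====
-- A primes 'result' with the first n elements (islice), yields it if complete,
-- then slides: result = result[1:] + (elem,) for each remaining elem, yielding each.
def iterWindowLoopA (result : List Int) (rest : List Int) : List (List Int) :=
  match rest with
  | [] => []
  | e :: rs =>
    let r := result.drop 1 ++ [e]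
    r :: iterWindowLoopA r rs

def iterWindow (seq : List Int) (n : Int) : List (List Int) :=
  let result := seq.take n.toNat
  (if (result.length : Int) = n then [result] else [])
    ++ iterWindowLoopA result (seq.drop n.toNat)

-- ===== PORT B =====
-- B: for i in range(len(items) - n + 1): yield tuple(items[i:i+n])
def iterWindow_alt (seq : List Int) (n : Int) : List (List Int) :=
  (PySem.List.pyRange 0 ((seq.length : Int) - n + 1) 1).map
    (fun i => PySem.List.slice seq (some i) (some (i + n)))

-- ===== PRECONDITION & SPEC =====
-- Pre_ excludes n < 0, where A raises ValueError (islice refuses a negative stop),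
-- and the n = 0 corner, where zero-size windows are unspecified and A's value
-- ([()] then 1-tuples) and B's value (one () per start index) are both accidental.
def Pre_iterWindow (seq : List Int) (n : Int) : Prop := 1 ≤ n
instance (seq : List Int) (n : Int) : Decidable (Pre_iterWindow seq n) := by
  unfold Pre_iterWindow; infer_instance

def pvWitness_iterWindow : List Int × Int := ([1, 2, 3], 2)

def Spec_iterWindow (seq : List Int) (n : Int) (out : List (List Int)) : Prop := out = iterWindow_alt seq n
instance (seq : List Int) (n : Int) (out : List (List Int)) : Decidable (Spec_iterWindow seq n out) := by unfold Spec_iterWindow; infer_instance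

-- ===== CLAIM (what is proved, stated in full; the proofs are below) =====
def Claim_equal_iterWindow : Prop := ∀ (seq : List Int) (n : Int), Dom_iterWindow seq n → Pre_iterWindow seq n → Spec_iterWindow seq n (iterWindow seq n)

-- ===== LEMMAS AND PROOFS =====

-- A's sliding loop, started from the full window at position i, yields exactly the
-- slice starting at j for each later start index j.
theorem loopA_slices (seq : List Int) (nn : Nat) (hn : 1 ≤ nn) :
    ∀ k i, seq.length = i + nn + k →
    iterWindowLoopA ((seq.drop i).take nn) (seq.drop (i + nn)) =
      (List.range' (i + 1) k).map (fun j => (seq.drop j).take nn) := by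
  intro k
  induction k with
  | zero =>
    intro i h
    have : seq.drop (i + nn) = [] := by simp; omega
    simp [this, iterWindowLoopA]
  | succ k ih =>
    intro i h
    have hlt : i + nn < seq.length := by omega
    have hdrop : seq.drop (i + nn) = seq[i + nn] :: seq.drop (i + nn + 1) :=
      (List.getElem_cons_drop hlt).symm
    rw [hdrop]
    simp only [iterWindowLoopA]
    have hr : ((seq.drop i).take nn).drop 1 ++ [seq[i + nn]]
        = (seq.drop (i + 1)).take nn := by
      rw [List.drop_take, List.drop_drop]
      have h1 : (seq.drop (i + 1)).take (nn - 1) ++ [seq[i + nn]]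
          = (seq.drop (i + 1)).take (nn - 1 + 1) := by
        rw [List.take_succ]
        have : (seq.drop (i + 1))[nn - 1]? = some seq[i + nn] := by
          rw [List.getElem?_drop]
          have : i + 1 + (nn - 1) = i + nn := by omega
          rw [this, List.getElem?_eq_getElem hlt]
        simp [this]
      rw [h1]
      have : nn - 1 + 1 = nn := by omega
      rw [this]
    rw [hr]
    have h2 : seq.drop (i + 1 + nn) = seq.drop (i + nn + 1) := by
      congr 1; omega
    have := ih (i + 1) (by omega)
    rw [h2] at this
    rw [this, List.range'_succ]
    simp

theorem iterWindow_eq (seq : List Int) (n : Int) (hn : 1 ≤ n) :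
    iterWindow seq n = iterWindow_alt seq n := by
  have hnn : n = ((n.toNat : Nat) : Int) := by omega
  set nn := n.toNat with hdef
  have hn1 : 1 ≤ nn := by omega
  simp only [iterWindow, iterWindow_alt]
  by_cases h : seq.length < nn
  · -- too short: A yields nothing, B's range is empty
    have h1 : (seq.take nn).length = seq.length := by simp; omega
    rw [if_neg (by rw [h1]; intro hc; omega)]
    have h2 : seq.drop nn = [] := by simp; omega
    rw [h2]
    have h3 : (seq.length : Int) - n + 1 ≤ 0 := by omega
    rw [PySem.List.pyRange_one_eq_nil h3]
    rfl
  · -- long enough: both are the list of slices at starts 0 .. len - nn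
    push_neg at h
    have h1 : ((seq.take nn).length : Int) = n := by simp; omega
    rw [if_pos h1]
    have hA : seq.take nn = (seq.drop 0).take nn := by simp
    have hA2 : seq.drop nn = seq.drop (0 + nn) := by simp
    rw [hA, hA2, loopA_slices seq nn hn1 (seq.length - nn) 0 (by omega)]
    have hm : (seq.length : Int) - n + 1 = ((seq.length - nn + 1 : Nat) : Int) := by
      push_cast; omega
    rw [hm, PySem.List.pyRange_zero_natCast]
    rw [List.map_map]
    have hslice : ∀ k : Nat, PySem.List.slice seq (some (k : Int)) (some ((k : Int) + n))
        = (seq.drop k).take nn := by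
      intro k
      rw [hnn, PySem.List.slice_natCast_add]
    have hrhs : (List.range (seq.length - nn + 1)).map
        ((fun i => PySem.List.slice seq (some i) (some (i + n))) ∘ (fun k : Nat => (k : Int)))
        = (List.range (seq.length - nn + 1)).map (fun j => (seq.drop j).take nn) := by
      apply List.map_congr_left
      intro k _
      exact hslice k
    rw [hrhs, List.range_eq_range']
    have : seq.length - nn + 1 = (seq.length - nn) + 1 := rfl
    rw [this, List.range'_succ]
    simp

-- ===== VERDICT (by name: the statements are the Claim_ definitions above) =====
theorem iterWindow_spec : Claim_equal_iterWindow := by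
  intro seq n _ hpre
  unfold Spec_iterWindow
  exact iterWindow_eq seq n hpre
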